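-- pv_equiv track=rewrite | github.com/krzychsol/ASD | Templatki/Sortowania/SumBetween.py | median5
-- ===== SOURCE A (Python) =====
-- def getmedian(p,r):
--     return (r-p)//2+p
--
-- def median5(A,p,r):
--     for i in range(p,r+1):
--         cnt = p
--         for j in range(p,r+1):
--             if A[i] > A[j]:
--                 cnt += 1
--         if cnt == getmedian(p,r):
--             return i
-- ===== SOURCE B (Python) =====
-- def median5(A, p, r):
--     # Rank-based: an element's count of strictly smaller window elements is the
--     # index of its first occurrence in the sorted window.
--     vals = [A[i] for i in range(p, r + 1)]
--     rank = {}
--     for k, v in enumerate(sorted(vals)):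
--         rank.setdefault(v, k)
--     m = (r - p) // 2
--     for i in range(p, r + 1):
--         if rank[A[i]] == m:
--             return i
-- ===== Notes on version B (the rewrite author's own statement) =====
-- stated objective: alternative
-- what changed: replaces A's O(n^2) per-index count-of-smaller scan by sorting the window once, building a first-occurrence rank dictionary from the sorted window, and one scan for the first index whose rank is the median rank; Pre_ excludes only the inputs where A raises IndexError (a nonempty index range p..r reaching outside the list)
import Mathlib
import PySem

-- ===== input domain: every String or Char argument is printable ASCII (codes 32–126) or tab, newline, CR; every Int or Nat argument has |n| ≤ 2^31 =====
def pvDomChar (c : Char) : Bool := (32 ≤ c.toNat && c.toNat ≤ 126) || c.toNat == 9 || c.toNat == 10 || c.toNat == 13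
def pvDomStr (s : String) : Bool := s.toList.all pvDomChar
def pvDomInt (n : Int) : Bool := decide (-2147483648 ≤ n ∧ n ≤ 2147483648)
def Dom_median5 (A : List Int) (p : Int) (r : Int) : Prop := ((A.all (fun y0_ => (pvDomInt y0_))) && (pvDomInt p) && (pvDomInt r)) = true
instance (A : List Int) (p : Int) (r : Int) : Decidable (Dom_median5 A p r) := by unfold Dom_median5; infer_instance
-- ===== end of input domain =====

-- B sorts the window once and looks each element's strict-less rank up in a
-- first-occurrence dictionary over the sorted window, instead of A's per-index counting.

-- ===== PORT A =====
def getmedian (p : Int) (r : Int) : Int := PySem.Int.floordiv (r - p) 2 + p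

def median5 (A : List Int) (p : Int) (r : Int) : Option Int :=
  (PySem.List.pyRange p (r + 1) 1).foldl
    (fun res i =>
      match res with
      | some y => some y
      | none =>
          let cnt := (PySem.List.pyRange p (r + 1) 1).foldl
            (fun cnt j =>
              if PySem.List.pyGetD A i 0 > PySem.List.pyGetD A j 0 then cnt + 1 else cnt)
            p
          if cnt = getmedian p r then some i else none)
    none

-- ===== PORT B =====
def median5_alt (A : List Int) (p : Int) (r : Int) : Option Int :=
  let vals := (PySem.List.pyRange p (r + 1) 1).map (fun i => PySem.List.pyGetD A i 0)
  let rank := (PySem.List.enumerate (PySem.List.sorted vals (fun x => x) false) 0).foldl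
    (fun d kv => d.setdefault kv.2 kv.1) PySem.Dict.empty
  let m := PySem.Int.floordiv (r - p) 2
  (PySem.List.pyRange p (r + 1) 1).foldl
    (fun res i =>
      match res with
      | some y => some y
      | none =>
          -- rank[A[i]]: KeyError cannot occur — every A[i] of the range occurs in vals
          match rank.get? (PySem.List.pyGetD A i 0) with
          | some k => if k = m then some i else none
          | none => none)
    none

-- ===== PRECONDITION & SPEC =====
-- Pre_ excludes exactly the inputs where A raises IndexError: a nonempty index range p..r
-- containing an index outside Python's valid (negative-wrapping) range for A.
def Pre_median5 (A : List Int) (p : Int) (r : Int) : Prop :=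
  p ≤ r → (-(A.length : Int) ≤ p ∧ r < (A.length : Int))
instance (A : List Int) (p : Int) (r : Int) : Decidable (Pre_median5 A p r) := by
  unfold Pre_median5; infer_instance

def pvWitness_median5 : List Int × Int × Int := ([1, 2, 3], 0, 2)

def Spec_median5 (A : List Int) (p : Int) (r : Int) (out : Option Int) : Prop := out = median5_alt A p r
instance (A : List Int) (p : Int) (r : Int) (out : Option Int) : Decidable (Spec_median5 A p r out) := by
  unfold Spec_median5; infer_instance

-- ===== CLAIM (what is proved, stated in full; the proofs are below) =====
def Claim_equal_median5 : Prop := ∀ (A : List Int) (p : Int) (r : Int), Dom_median5 A p r → Pre_median5 A p r → Spec_median5 A p r (median5 A p r)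

-- ===== LEMMAS AND PROOFS =====

lemma pv_foldl_some (l : List Int) (g : Int → Option Int) (x : Int) :
    List.foldl (fun res i => match res with | some y => some y | none => g i) (some x) l = some x := by
  induction l with
  | nil => rfl
  | cons a t ih => exact ih

lemma pv_foldl_find (l : List Int) (P : Int → Prop) [DecidablePred P] :
    List.foldl (fun res i => match res with | some y => some y | none => if P i then some i else none) none l
      = List.find? (fun i => decide (P i)) l := by
  induction l with
  | nil => rfl
  | cons a t ih =>
    simp only [List.foldl_cons]
    by_cases hPa : P a
    · rw [if_pos hPa, pv_foldl_some, List.find?_cons_of_pos (by simpa using hPa)]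
    · rw [if_neg hPa, ih, List.find?_cons_of_neg (by simpa using hPa)]

lemma pv_find?_ext (l : List Int) (q₁ q₂ : Int → Bool) (h : ∀ x ∈ l, q₁ x = q₂ x) :
    List.find? q₁ l = List.find? q₂ l := by
  induction l with
  | nil => rfl
  | cons a t ih =>
    have ha : q₁ a = q₂ a := h a (by simp)
    by_cases hq : q₂ a = true
    · rw [List.find?_cons_of_pos (ha.trans hq), List.find?_cons_of_pos hq]
    · rw [List.find?_cons_of_neg (by rw [ha]; exact hq), List.find?_cons_of_neg hq]
      exact ih (fun x hx => h x (by simp [hx]))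

lemma pv_rank_get (l : List Int) (s : Int) (d : PySem.Dict Int Int) (v : Int) :
    ((PySem.List.enumerate l s).foldl (fun d kv => d.setdefault kv.2 kv.1) d).get? v
      = (d.get? v).or ((l.idxOf? v).map (fun k => s + (k : Int))) := by
  induction l generalizing s d with
  | nil => simp [PySem.List.enumerate_nil]
  | cons a t ih =>
    rw [PySem.List.enumerate_cons, List.foldl_cons, ih]
    dsimp only
    by_cases hva : v = a
    · subst hva
      cases hg : d.get? v with
      | some w =>
        have hc : d.contains v = true := by
          rw [PySem.Dict.contains_eq_isSome_get?, hg]; rfl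
        rw [PySem.Dict.setdefault_of_contains d s hc, hg]
        simp
      | none =>
        have hc : d.contains v = false := by
          rw [PySem.Dict.contains_eq_isSome_get?, hg]; rfl
        rw [PySem.Dict.setdefault_of_not_contains d s hc,
            PySem.Dict.get?_insert_self]
        simp [List.idxOf?_cons]
    · rw [PySem.Dict.get?_setdefault_of_ne d s hva]
      have hne : (a == v) = false := by simp [Ne.symm hva]
      have : (t.idxOf? v).map (fun k => s + 1 + (k : Int))
           = ((a :: t).idxOf? v).map (fun k => s + (k : Int)) := by
        rw [List.idxOf?_cons]
        simp only [hne, Bool.false_eq_true, if_false]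
        cases t.idxOf? v with
        | none => rfl
        | some k =>
          simp
          ring
      rw [this]

lemma pv_countP_drop_zero (s : List Int) (v : Int) (k : Nat)
    (hhigh : ∀ (j : Nat), k ≤ j → ∀ (hj : j < s.length), v ≤ s[j]) :
    List.countP (fun x => decide (x < v)) (s.drop k) = 0 := by
  rw [List.countP_eq_zero]
  intro a ha
  obtain ⟨j, hj, hja⟩ := List.mem_iff_getElem.mp ha
  have hjlen : k + j < s.length := by
    rw [List.length_drop] at hj; omega
  rw [List.getElem_drop] at hja
  simp only [decide_eq_true_eq]
  intro hav
  have hle := hhigh (k + j) (Nat.le_add_right k j) hjlen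
  rw [hja] at hle
  omega

lemma pv_countP_le (s : List Int) (v : Int) (k : Nat)
    (hhigh : ∀ (j : Nat), k ≤ j → ∀ (hj : j < s.length), v ≤ s[j]) :
    List.countP (fun x => decide (x < v)) s ≤ k := by
  conv_lhs => rw [← List.take_append_drop k s]
  rw [List.countP_append, pv_countP_drop_zero s v k hhigh]
  have h1 := List.countP_le_length (p := fun x => decide (x < v)) (l := s.take k)
  rw [List.length_take] at h1
  omega

lemma pv_countP_ge (s : List Int) (v : Int) (k : Nat) (hk : k ≤ s.length)
    (hlow : ∀ (j : Nat) (hj : j < k), s[j]'(Nat.lt_of_lt_of_le hj hk) < v) :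
    k ≤ List.countP (fun x => decide (x < v)) s := by
  conv_rhs => rw [← List.take_append_drop k s]
  rw [List.countP_append]
  have : List.countP (fun x => decide (x < v)) (s.take k) = k := by
    rw [List.countP_eq_length.mpr, List.length_take]
    · omega
    · intro a ha
      obtain ⟨j, hj, hja⟩ := List.mem_iff_getElem.mp ha
      have hjk : j < k := by rw [List.length_take] at hj; omega
      rw [List.getElem_take] at hja
      simp only [decide_eq_true_eq]
      rw [← hja]
      exact hlow j hjk
  omega

-- in the sorted window, the first index of a member v is the number of strictly smaller elements
lemma pv_idxOf?_sorted (vals : List Int) (v : Int) (hv : v ∈ vals) :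
    List.idxOf? v (PySem.List.sorted vals (fun x => x) false)
      = some (List.countP (fun x => decide (x < v)) vals) := by
  set s := PySem.List.sorted vals (fun x => x) false with hs
  have mono : ∀ (a b : Nat) (hab : a ≤ b) (hb : b < s.length),
      s[a]'(Nat.lt_of_le_of_lt hab hb) ≤ s[b]'hb := by
    intro a b hab hb
    exact PySem.List.sorted_id_getElem_mono vals hab hb
  have hperm : List.countP (fun x => decide (x < v)) vals = List.countP (fun x => decide (x < v)) s :=
    ((PySem.List.sorted_perm vals (fun x => x) false).countP_eq _).symm
  have hvs : v ∈ s := (PySem.List.mem_sorted vals (fun x => x) false v).mpr hv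
  obtain ⟨j0, hj0, hj0v⟩ := List.mem_iff_getElem.mp hvs
  set c := List.countP (fun x => decide (x < v)) s with hc
  -- c ≤ j0 < length
  have hcj0 : c ≤ j0 := pv_countP_le s v j0 (by
    intro k hk hkl
    calc v = s[j0] := hj0v.symm
    _ ≤ s[k] := mono j0 k hk hkl)
  have hclen : c < s.length := lt_of_le_of_lt hcj0 hj0
  -- every index < c holds a value < v
  have hlow : ∀ (j : Nat), j < c → ∀ (hj : j < s.length), s[j] < v := by
    intro j hjc hj
    by_contra hnot
    push Not at hnot
    have := pv_countP_le s v j (by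
      intro k hk hkl
      exact le_trans hnot (mono j k hk hkl))
    omega
  -- s[c] = v
  have hcv : s[c] = v := by
    have h1 : v ≤ s[c] := by
      by_contra hnot
      push Not at hnot
      have := pv_countP_ge s v (c + 1) hclen (by
        intro k hk
        exact lt_of_le_of_lt (mono k c (by omega) hclen) hnot)
      omega
    have h2 : s[c] ≤ v := by rw [← hj0v]; exact mono c j0 hcj0 hj0
    omega
  rw [hperm, List.idxOf?_eq_some_iff]
  exact ⟨hclen, hcv, fun j hjc => by
    have := hlow j hjc (by omega)
    omega⟩

-- ===== VERDICT (by name: the statement is the Claim_ definition above) =====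
theorem median5_spec : Claim_equal_median5 := by
  unfold Claim_equal_median5
  intro A p r _ _
  show median5 A p r = median5_alt A p r
  set R := PySem.List.pyRange p (r + 1) 1 with hR
  set vals := R.map (fun i => PySem.List.pyGetD A i 0) with hvals
  set mI := PySem.Int.floordiv (r - p) 2 with hmI
  set rank := (PySem.List.enumerate (PySem.List.sorted vals (fun x => x) false) 0).foldl
    (fun d kv => d.setdefault kv.2 kv.1) PySem.Dict.empty with hrank
  have hgm : getmedian p r = mI + p := by rw [hmI]; rfl
  have hinner : ∀ v : Int,
      List.foldl (fun cnt j => if v > PySem.List.pyGetD A j 0 then cnt + 1 else cnt) p R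
        = p + ((List.countP (fun x => decide (x < v)) vals : Nat) : Int) := by
    intro v
    have h1 := PySem.List.foldl_ite_add_one (fun x : Int => v > x) vals p
    rw [hvals, List.foldl_map] at h1
    rw [h1, ← hvals]
  have hA1 : median5 A p r = List.find?
      (fun i => decide (List.foldl
        (fun cnt j => if PySem.List.pyGetD A i 0 > PySem.List.pyGetD A j 0 then cnt + 1 else cnt)
        p R = getmedian p r)) R :=
    pv_foldl_find R _
  simp only [hinner, hgm] at hA1
  have hstep : (fun (res : Option Int) (i : Int) =>
      match res with
      | some y => some y
      | none =>
          match rank.get? (PySem.List.pyGetD A i 0) with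
          | some k => if k = mI then some i else none
          | none => none)
    = (fun (res : Option Int) (i : Int) =>
      match res with
      | some y => some y
      | none => if rank.get? (PySem.List.pyGetD A i 0) = some mI then some i else none) := by
    funext res i
    cases res with
    | some y => rfl
    | none =>
      cases hg : rank.get? (PySem.List.pyGetD A i 0) with
      | none => simp
      | some k =>
        by_cases hk : k = mI
        · simp [hk]
        · simp [hk]
  have hB1 : median5_alt A p r
      = List.find? (fun i => decide (rank.get? (PySem.List.pyGetD A i 0) = some mI)) R := by
    show List.foldl _ none R = _
    rw [hstep]
    exact pv_foldl_find R (fun i => rank.get? (PySem.List.pyGetD A i 0) = some mI)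
  rw [hA1, hB1]
  refine pv_find?_ext R _ _ ?_
  intro i hi
  have hvmem : PySem.List.pyGetD A i 0 ∈ vals := by
    rw [hvals]; exact List.mem_map.mpr ⟨i, hi, rfl⟩
  have hget : rank.get? (PySem.List.pyGetD A i 0)
      = some (0 + ((List.countP (fun x => decide (x < PySem.List.pyGetD A i 0)) vals : Nat) : Int)) := by
    rw [hrank, pv_rank_get, pv_idxOf?_sorted vals _ hvmem]
    simp [PySem.Dict.get?_empty]
  rw [hget, decide_eq_decide]
  constructor
  · intro h
    have : ((List.countP (fun x => decide (x < PySem.List.pyGetD A i 0)) vals : Nat) : Int) = mI := by omega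
    rw [this, zero_add]
  · intro h
    have := Option.some_inj.mp h
    omega
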